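-- pv_equiv track=rewrite | github.com/flake123p/ProjectH | Python/X03_ScreenLogicHelperOLD/test.py | UpperAndUnderlineString
-- ===== SOURCE A (Python) =====
-- def UpperAndUnderlineString(string):
-- 	mystr = '';
-- 	for i in string:
-- 		if i == " ":
-- 			mystr = mystr + "_"
-- 		elif i != "\n":
-- 			mystr = mystr + i
-- 	return mystr.upper()
-- ===== SOURCE B (Python) =====
-- def UpperAndUnderlineString(string):
-- 	return string.replace(" ", "_").replace("\n", "").upper()
-- ===== Notes on version B (the rewrite author's own statement) =====
-- stated objective: idiomatic
-- what changed: Replaces the hand-rolled per-character accumulation loop with a chain of whole-string passes: replace spaces with underscores, delete newlines, then uppercase.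
import Mathlib
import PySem

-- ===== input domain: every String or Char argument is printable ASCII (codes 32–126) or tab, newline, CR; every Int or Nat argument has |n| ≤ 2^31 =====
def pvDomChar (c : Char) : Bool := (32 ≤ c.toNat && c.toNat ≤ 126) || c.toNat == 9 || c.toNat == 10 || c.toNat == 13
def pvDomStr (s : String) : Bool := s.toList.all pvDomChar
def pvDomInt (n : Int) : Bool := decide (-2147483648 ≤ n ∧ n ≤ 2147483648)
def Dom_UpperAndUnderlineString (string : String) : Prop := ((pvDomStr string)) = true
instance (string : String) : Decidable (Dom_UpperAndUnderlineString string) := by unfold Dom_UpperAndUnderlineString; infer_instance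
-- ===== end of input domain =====

-- B replaces A's hand-rolled character-accumulation loop with a chain of whole-string
-- passes (replace spaces, delete newlines, uppercase) — more idiomatic, same values.

-- ===== PORT A =====
-- literal transliteration of A: a loop over the characters building mystr, then .upper()
def UpperAndUnderlineString (string : String) : String :=
  let mystr : String :=
    string.toList.foldl
      (fun mystr i =>
        if i == ' ' then mystr ++ "_"
        else if i != '\n' then mystr ++ String.singleton i
        else mystr)
      ""
  PySem.Str.upper mystr

-- ===== PORT B =====
-- transliteration of Source B: string.replace(" ", "_").replace("\n", "").upper()
def UpperAndUnderlineString_alt (string : String) : String :=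
  PySem.Str.upper (PySem.Str.replace (PySem.Str.replace string " " "_") "\n" "")

-- ===== PRECONDITION & SPEC =====
def Spec_UpperAndUnderlineString (string : String) (out : String) : Prop := out = UpperAndUnderlineString_alt string
instance (string : String) (out : String) : Decidable (Spec_UpperAndUnderlineString string out) := by unfold Spec_UpperAndUnderlineString; infer_instance

-- ===== CLAIM (what is proved, stated in full; the proofs are below) =====
def Claim_equal_UpperAndUnderlineString : Prop := ∀ (string : String), Dom_UpperAndUnderlineString string → Spec_UpperAndUnderlineString string (UpperAndUnderlineString string)

-- ===== LEMMAS AND PROOFS =====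

-- replace with a single-character pattern acts characterwise
theorem replace_go_single (o : Char) (new : List Char) :
    ∀ (l acc : List Char) (fuel : Nat), l.length ≤ fuel →
      PySem.Chars.replace.go [o] new fuel l acc
        = acc.reverse ++ l.flatMap (fun c => if c = o then new else [c]) := by
  intro l
  induction l with
  | nil =>
      intro acc fuel _
      cases fuel <;> simp [PySem.Chars.replace.go]
  | cons c t ih =>
      intro acc fuel hf
      cases fuel with
      | zero => simp at hf
      | succ fuel =>
        rw [PySem.Chars.replace.go]
        by_cases hc : c = o
        · subst hc
          have hpre : List.isPrefixOf [c] (c :: t) = true := by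
            simp [List.isPrefixOf]
          simp only [hpre, if_pos]
          rw [show List.drop [c].length (c :: t) = t from rfl]
          rw [ih _ fuel (by simpa using Nat.le_of_succ_le_succ hf)]
          simp
        · have hpre : List.isPrefixOf [o] (c :: t) = false := by
            simp only [List.isPrefixOf, Bool.and_eq_false_iff, beq_eq_false_iff_ne, ne_eq]
            exact Or.inl fun h => hc h.symm
          simp only [hpre]
          rw [if_neg (by simp)]
          rw [ih _ fuel (by simpa using Nat.le_of_succ_le_succ hf)]
          simp [hc]

theorem replace_single (s : List Char) (o : Char) (new : List Char) :
    PySem.Chars.replace s [o] new = s.flatMap (fun c => if c = o then new else [c]) := by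
  rw [PySem.Chars.replace]
  simp only [List.isEmpty_cons, Bool.false_eq_true, if_false]
  simpa using replace_go_single o new s [] s.length le_rfl

-- ===== VERDICT (by name: the statement is the Claim_ definition above) =====
theorem UpperAndUnderlineString_spec : Claim_equal_UpperAndUnderlineString := by
  intro s _
  unfold Spec_UpperAndUnderlineString UpperAndUnderlineString UpperAndUnderlineString_alt
  apply String.toList_injective
  simp only [PySem.Str.toList_upper, PySem.Str.toList_replace]
  congr 1
  -- pull the String fold down to a list fold via toList
  have hfold :
      (String.toList
        (s.toList.foldl
          (fun mystr i =>
            if i == ' ' then mystr ++ "_"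
            else if i != '\n' then mystr ++ String.singleton i
            else mystr)
          ""))
      = s.toList.foldl
          (fun acc i =>
            if i == ' ' then acc ++ ['_']
            else if i != '\n' then acc ++ [i]
            else acc)
          [] := by
    have h := List.foldl_hom (f := String.toList)
      (g₁ := fun mystr i =>
        if i == ' ' then mystr ++ "_"
        else if i != '\n' then mystr ++ String.singleton i
        else mystr)
      (g₂ := fun acc i =>
        if i == ' ' then acc ++ ['_']
        else if i != '\n' then acc ++ [i]
        else acc)
      (l := s.toList) (init := "")
      (by
        intro acc i
        by_cases h1 : i = ' ' <;> by_cases h2 : i = '\n' <;> simp [h1, h2])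
    simpa using h.symm
  rw [hfold]
  have hA : (s.toList.foldl
      (fun acc i =>
        if i == ' ' then acc ++ ['_']
        else if i != '\n' then acc ++ [i]
        else acc)
      [])
      = s.toList.flatMap (fun i => if i == ' ' then ['_'] else if i != '\n' then [i] else []) := by
    rw [PySem.List.foldl_congr_mem _ _
          (fun acc i => acc ++ (if i == ' ' then ['_'] else if i != '\n' then [i] else [])) _
          (by
            intro acc i _
            by_cases h1 : i = ' ' <;> by_cases h2 : i = '\n' <;> simp [h1, h2])]
    simpa using PySem.List.foldl_append_eq_flatMap
      (fun i => if i == ' ' then ['_'] else if i != '\n' then [i] else []) s.toList []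
  rw [hA]
  -- B's side: two characterwise replaces compose
  rw [show (" " : String).toList = [' '] from rfl,
      show ("_" : String).toList = ['_'] from rfl,
      show ("\n" : String).toList = ['\n'] from rfl,
      show ("" : String).toList = [] from rfl]
  rw [replace_single, replace_single, List.flatMap_assoc]
  apply List.flatMap_congr
  intro i _
  by_cases h1 : i = ' ' <;> by_cases h2 : i = '\n' <;> simp [h1, h2]
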